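-- pv_equiv track=rewrite | github.com/daniellevin233/Python_projects | Introduction_to_Python/ex5_crossword/crossword.py | first_row_main_diag
-- ===== SOURCE A (Python) =====
-- DELIMITER = ''
--
-- FIRST_ELEMENT_INDEX = 0
--
-- def first_row_main_diag(lst_2d):
--     """
--     Function will create list of strings that sign the corresponding main diagonal that begins on first row of matrix
--     and all other diagonal that begins on first row in crossword.
--     :param lst_2d: Two dimensional list of letters that sign the matrix.
--     :return: List of strings that sign coherent diagonals
--     """
--     lst_of_first_row_diag_str = []
--     for j in range(FIRST_ELEMENT_INDEX + 1, len(lst_2d[FIRST_ELEMENT_INDEX])):  # begin from (FIRST_ELEMENT_INDEX + 1)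
--         # because we've already add the longest main diagonal
--         str_main_diag = DELIMITER
--         index_j = j  # again use the internal index that begins from the external one
--         for i in range(len(lst_2d)):
--             str_main_diag += lst_2d[i][index_j]
--             if index_j + 1 == len(lst_2d[FIRST_ELEMENT_INDEX]) or i + 1 == len(lst_2d):  #check if we've got to border
--                 lst_of_first_row_diag_str.append(str_main_diag)
--                 break
--             index_j += 1
--     return lst_of_first_row_diag_str
-- ===== SOURCE B (Python) =====
-- def first_row_main_diag(lst_2d):
--     w = len(lst_2d[0])
--     buckets = [[] for _ in range(w)]
--     for i, row in enumerate(lst_2d):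
--         for d in range(1, w - i):
--             buckets[d].append(row[d + i])
--     return [''.join(b) for b in buckets[1:]]
-- ===== Notes on version B (the rewrite author's own statement) =====
-- stated objective: alternative
-- what changed: A extracts each diagonal separately, walking it top-to-bottom with a mutable column index, a growing string accumulator and a per-step border test that breaks; B makes one row-major pass over the matrix, distributing each cell into a bucket keyed by its column offset d=j-i so all diagonals are built simultaneously, then joins each bucket once.
import Mathlib
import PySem

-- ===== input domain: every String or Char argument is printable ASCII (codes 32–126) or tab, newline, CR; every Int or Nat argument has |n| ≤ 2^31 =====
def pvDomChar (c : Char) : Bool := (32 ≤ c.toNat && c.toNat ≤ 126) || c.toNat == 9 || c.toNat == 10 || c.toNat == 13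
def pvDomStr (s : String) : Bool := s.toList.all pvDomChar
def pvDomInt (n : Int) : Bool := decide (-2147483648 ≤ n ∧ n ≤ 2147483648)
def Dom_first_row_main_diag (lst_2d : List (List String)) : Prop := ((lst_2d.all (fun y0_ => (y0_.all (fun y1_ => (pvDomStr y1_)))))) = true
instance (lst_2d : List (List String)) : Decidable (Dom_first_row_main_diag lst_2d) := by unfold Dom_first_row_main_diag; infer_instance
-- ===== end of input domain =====

-- B replaces A's diagonal-by-diagonal walk (mutable column index, string accumulator, border-test break)
-- by ONE row-major pass distributing each cell into a bucket per column offset; objective: alternative.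

-- ===== PORT A =====
-- inner 'for i in range(len(lst_2d))' loop of A: accumulates the diagonal string (as chars),
-- returns some acc at the 'break' (the only place A appends), none if the loop runs out.
def firstRowDiagLoopA (l : List (List String)) (n w : Nat) (i : Nat) (idx : Int)
    (acc : List Char) : Nat → Option (List Char)
  | 0 => none
  | Nat.succ fuel =>
    let acc' := acc ++ (PySem.List.pyGetD (PySem.List.pyGetD l (i : Int) []) idx "").toList
    if idx + 1 = (w : Int) ∨ i + 1 = n then some acc'
    else firstRowDiagLoopA l n w (i + 1) (idx + 1) acc' fuel

def first_row_main_diag (lst_2d : List (List String)) : List String :=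
  (PySem.List.pyRange 1 ((PySem.List.pyGetD lst_2d 0 []).length : Int) 1).foldl
    (fun res j =>
      match firstRowDiagLoopA lst_2d lst_2d.length (PySem.List.pyGetD lst_2d 0 []).length
          0 j [] lst_2d.length with
      | some s => res ++ [String.ofList s]
      | none => res) []

-- ===== PORT B =====
-- inner 'for d in range(1, w - i): buckets[d].append(row[d + i])' of B;
-- d ≥ 1 throughout the range, so Python's nonnegative index buckets[d] is d.toNat.
def rowStepB (w : Nat) (bks : List (List String)) (i : Int) (row : List String) :
    List (List String) :=
  (PySem.List.pyRange 1 ((w : Int) - i) 1).foldl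
    (fun b d => b.modify d.toNat (fun cs => cs ++ [PySem.List.pyGetD row (d + i) ""])) bks

def first_row_main_diag_alt (lst_2d : List (List String)) : List String :=
  let w := (PySem.List.pyGetD lst_2d 0 []).length
  let buckets := (PySem.List.enumerate lst_2d 0).foldl
    (fun bks p => rowStepB w bks p.1 p.2) (List.replicate w [])
  (PySem.List.slice buckets (some 1) none).map (fun b => PySem.Str.join "" b)

-- ===== PRECONDITION & SPEC =====
-- Pre_ is exactly the set of inputs on which the Python A returns normally: the matrix is
-- nonempty and every row that a first-row diagonal reaches (row i with i+1 < len(row 0))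
-- is at least as long as row 0; elsewhere A raises IndexError.
def Pre_first_row_main_diag (lst_2d : List (List String)) : Prop :=
  lst_2d ≠ [] ∧ ∀ i : Nat, i < lst_2d.length → i + 1 < (lst_2d.headI).length →
    (lst_2d.headI).length ≤ (lst_2d.getD i []).length
instance (lst_2d : List (List String)) : Decidable (Pre_first_row_main_diag lst_2d) := by
  unfold Pre_first_row_main_diag; infer_instance

def pvWitness_first_row_main_diag : List (List String) :=
  [["a", "b", "c"], ["d", "e", "f"]]

def Spec_first_row_main_diag (lst_2d : List (List String)) (out : List String) : Prop := out = first_row_main_diag_alt lst_2d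
instance (lst_2d : List (List String)) (out : List String) : Decidable (Spec_first_row_main_diag lst_2d out) := by unfold Spec_first_row_main_diag; infer_instance

-- ===== CLAIM (what is proved, stated in full; the proofs are below) =====
def Claim_equal_first_row_main_diag : Prop := ∀ (lst_2d : List (List String)), Dom_first_row_main_diag lst_2d → Pre_first_row_main_diag lst_2d → Spec_first_row_main_diag lst_2d (first_row_main_diag lst_2d)

-- ===== LEMMAS AND PROOFS =====

-- common closed form: diagonal j is the joined cells l[t][j+t] for t in range(min(n, w-j))
def diagSpec (l : List (List String)) : List String :=
  (PySem.List.pyRange 1 ((PySem.List.pyGetD l 0 []).length : Int) 1).map (fun j =>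
    PySem.Str.join "" ((PySem.List.pyRange 0
        (min (l.length : Int) (((PySem.List.pyGetD l 0 []).length : Int) - j)) 1).map
      (fun t => PySem.List.pyGetD (PySem.List.pyGetD l t []) (j + t) "")))

-- ''.join over chars is concatenation
lemma chars_join_empty_sep (parts : List (List Char)) :
    PySem.Chars.join [] parts = parts.flatten := by
  match parts with
  | [] => simp [PySem.Chars.join_nil]
  | [p] => simp [PySem.Chars.join_singleton]
  | p :: q :: rest =>
    rw [PySem.Chars.join_cons_cons]
    simp [chars_join_empty_sep (q :: rest)]

lemma str_join_empty_sep (parts : List String) :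
    PySem.Str.join "" parts = String.ofList (parts.map String.toList).flatten := by
  apply String.toList_injective
  rw [PySem.Str.toList_join, String.toList_ofList]
  simpa using chars_join_empty_sep (parts.map String.toList)

lemma ofList_flatten_eq_join (cellf : Int → String) (rng : List Int) :
    String.ofList ((rng.map (fun t => (cellf t).toList)).flatten)
      = PySem.Str.join "" (rng.map cellf) := by
  rw [str_join_empty_sep, List.map_map]
  rfl

-- characterisation of A's inner loop with enough fuel, inside the border
lemma firstRowDiagLoopA_eq (l : List (List String)) (w : Nat) (j : Int) :
    ∀ (fuel i : Nat) (acc : List Char), i + fuel = l.length → i < l.length →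
      (j : Int) + i + 1 ≤ (w : Int) →
      firstRowDiagLoopA l l.length w i (j + i) acc fuel =
        some (acc ++ ((PySem.List.pyRange (i : Int) (min (l.length : Int) ((w : Int) - j)) 1).map
          (fun t => (PySem.List.pyGetD (PySem.List.pyGetD l t []) (j + t) "").toList)).flatten) := by
  intro fuel
  induction fuel with
  | zero => intro i acc hif hi _; omega
  | succ f ih =>
    intro i acc hif hi hjw
    have hiE : (i : Int) < min (l.length : Int) ((w : Int) - j) := by
      omega
    rw [firstRowDiagLoopA]
    by_cases hbr : (j + (i : Int)) + 1 = (w : Int) ∨ i + 1 = l.length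
    · have hE : min (l.length : Int) ((w : Int) - j) = (i : Int) + 1 := by omega
      rw [if_pos hbr, hE, PySem.List.pyRange_one_cons (by omega),
        PySem.List.pyRange_one_eq_nil (by omega)]
      simp
    · rw [if_neg hbr]
      rw [not_or] at hbr
      obtain ⟨hbr1, hbr2⟩ := hbr
      have h1 : (j : Int) + (i + 1 : Nat) + 1 ≤ (w : Int) := by push_cast; omega
      have := ih (i + 1) (acc ++ (PySem.List.pyGetD (PySem.List.pyGetD l (i : Int) []) (j + i) "").toList)
        (by omega) (by omega) h1
      rw [show (j + (i : Int)) + 1 = j + ((i + 1 : Nat) : Int) by push_cast; ring]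
      rw [this, PySem.List.pyRange_one_cons hiE]
      push_cast
      simp

-- A equals the closed form
lemma A_eq_diagSpec (l : List (List String)) (hl : l ≠ []) :
    first_row_main_diag l = diagSpec l := by
  have hn : 0 < l.length := List.length_pos_iff.mpr hl
  unfold first_row_main_diag diagSpec
  generalize (PySem.List.pyGetD l 0 []).length = w
  rw [PySem.List.foldl_congr_mem _ _
    (fun res j => res ++ [String.ofList
      (((PySem.List.pyRange (0 : Int) (min (l.length : Int) ((w : Int) - j)) 1).map
        (fun t => (PySem.List.pyGetD (PySem.List.pyGetD l t []) (j + t) "").toList)).flatten)]) _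
    ?_ ]
  · rw [PySem.List.foldl_append_singleton_eq_map]
    simp only [List.nil_append]
    apply List.map_congr_left
    intro j _
    exact ofList_flatten_eq_join _ _
  · intro acc j hj
    obtain ⟨hj1, hj2⟩ := PySem.List.mem_pyRange_one.mp hj
    have := firstRowDiagLoopA_eq l w j l.length 0 [] (by omega) hn (by push_cast; omega)
    simp only [Nat.cast_zero, add_zero] at this
    rw [this]
    rfl

-- ===== B-side lemmas =====

lemma length_foldl_modify (rng : List Int) (f : Int → List String → List String)
    (bks : List (List String)) :
    (rng.foldl (fun b d => b.modify d.toNat (f d)) bks).length = bks.length := by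
  induction rng generalizing bks with
  | nil => rfl
  | cons x rest ih => simp [List.foldl_cons, ih, List.length_modify]

lemma getD_foldl_modify (f : Int → List String → List String) :
    ∀ (rng : List Int), (∀ x ∈ rng, 0 ≤ x) → rng.Nodup →
    ∀ (bks : List (List String)) (d : Nat),
    (rng.foldl (fun b dd => b.modify dd.toNat (f dd)) bks).getD d []
      = if (d : Int) ∈ rng ∧ d < bks.length then f (d : Int) (bks.getD d []) else bks.getD d [] := by
  intro rng
  induction rng with
  | nil => intro _ _ bks d; simp
  | cons x rest ih =>
    intro hnn hnd bks d
    have hx : 0 ≤ x := hnn x (by simp)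
    have hmlen : (bks.modify x.toNat (f x)).length = bks.length := by
      simp [List.length_modify]
    have hm : (bks.modify x.toNat (f x)).getD d [] =
        if x = (d : Int) ∧ d < bks.length then f x (bks.getD d []) else bks.getD d [] := by
      by_cases hdl : d < bks.length
      · by_cases hxd : x = (d : Int)
        · have hxt : x.toNat = d := by omega
          rw [List.getD_eq_getElem?_getD, List.getElem?_modify, List.getElem?_eq_getElem hdl]
          simp [hxd, hdl, List.getD_eq_getElem?_getD]
        · have hxt : x.toNat ≠ d := by omega
          rw [List.getD_eq_getElem?_getD, List.getElem?_modify, List.getElem?_eq_getElem hdl]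
          simp [hxd, hdl, hxt, List.getD_eq_getElem?_getD]
      · rw [List.getD_eq_getElem?_getD, List.getElem?_modify]
        have h1 : bks[d]? = none := List.getElem?_eq_none (by omega)
        simp [hdl, List.getD_eq_getElem?_getD]
    rw [List.foldl_cons,
      ih (fun y hy => hnn y (by simp [hy])) hnd.of_cons (bks.modify x.toNat (f x)) d,
      hmlen, hm]
    have hxrest : x ∉ rest := (List.nodup_cons.mp hnd).1
    by_cases hdr : (d : Int) ∈ rest
    · have hxd : ¬ (x = (d : Int)) := fun h => hxrest (h ▸ hdr)
      simp [hdr, hxd, List.mem_cons]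
    · by_cases hxd : x = (d : Int)
      · by_cases hdl : d < bks.length <;> simp [hdr, hxd, hdl, List.mem_cons]
      · have hdx : ¬((d : Int) = x) := fun h => hxd h.symm
        simp [hdr, hdx, List.mem_cons]
        intro h
        exact absurd h hxd

lemma length_rowStepB (w : Nat) (bks : List (List String)) (i : Int) (row : List String) :
    (rowStepB w bks i row).length = bks.length :=
  length_foldl_modify _ (fun d cs => cs ++ [PySem.List.pyGetD row (d + i) ""]) bks

lemma getD_rowStepB (w : Nat) (bks : List (List String)) (i : Int) (row : List String) (d : Nat) :
    (rowStepB w bks i row).getD d []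
      = if 1 ≤ (d : Int) ∧ (d : Int) < (w : Int) - i ∧ d < bks.length
        then bks.getD d [] ++ [PySem.List.pyGetD row ((d : Int) + i) ""] else bks.getD d [] := by
  unfold rowStepB
  rw [getD_foldl_modify (fun dd cs => cs ++ [PySem.List.pyGetD row (dd + i) ""]) _
    (fun x hx => by have := (PySem.List.mem_pyRange_one).mp hx; omega)
    (PySem.List.nodup_pyRange_one _ _) bks d]
  simp only [PySem.List.mem_pyRange_one]
  split_ifs with h1 h2 <;> first | rfl | (exfalso; omega)

lemma pyGetD_cons_shift (x : List String) (xs : List (List String)) (t : Int)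
    (h1 : 1 ≤ t) (h2 : t < (xs.length : Int) + 1) :
    PySem.List.pyGetD (x :: xs) t [] = PySem.List.pyGetD xs (t - 1) [] := by
  rw [PySem.List.pyGetD_eq_getElem _ _ (by omega) (by simp only [List.length_cons]; push_cast; omega),
      PySem.List.pyGetD_eq_getElem _ _ (by omega) (by omega)]
  have h : t.toNat = (t - 1).toNat + 1 := by omega
  apply Option.some.inj
  rw [← List.getElem?_eq_getElem, ← List.getElem?_eq_getElem, h, List.getElem?_cons_succ]

lemma foldRows_getD (w : Nat) :
    ∀ (rows : List (List String)) (s : Int) (bks : List (List String)), 0 ≤ s →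
    bks.length = w → ∀ d : Nat, 1 ≤ d → d < w →
    ((PySem.List.enumerate rows s).foldl (fun b p => rowStepB w b p.1 p.2) bks).getD d []
      = bks.getD d [] ++ (PySem.List.pyRange s (min (s + rows.length) ((w : Int) - d)) 1).map
          (fun t => PySem.List.pyGetD (PySem.List.pyGetD rows (t - s) []) ((d : Int) + t) "") := by
  intro rows
  induction rows with
  | nil =>
    intro s bks hs hlen d hd1 hdw
    rw [PySem.List.enumerate_nil,
      PySem.List.pyRange_one_eq_nil (by simp only [List.length_nil]; push_cast; omega)]
    simp
  | cons row rest ih =>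
    intro s bks hs hlen d hd1 hdw
    rw [PySem.List.enumerate_cons, List.foldl_cons]
    have hlen' : (rowStepB w bks s row).length = w := by rw [length_rowStepB]; exact hlen
    rw [ih (s + 1) _ (by omega) hlen' d hd1 hdw, getD_rowStepB]
    have hmin : min (s + ((row :: rest).length : Int)) ((w : Int) - d)
        = min (s + 1 + (rest.length : Int)) ((w : Int) - d) := by
      simp only [List.length_cons]; push_cast; ring_nf
    rw [hmin]
    by_cases hc : (d : Int) < (w : Int) - s
    · rw [if_pos ⟨by omega, hc, by omega⟩]
      conv_rhs => rw [PySem.List.pyRange_one_cons (show s < min (s + 1 + (rest.length : Int)) ((w : Int) - d) by omega)]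
      rw [List.map_cons, List.append_assoc]
      congr 1
      rw [List.singleton_append]
      congr 1
      · -- head cell: t = s, row index 0
        simp only [sub_self, PySem.List.pyGetD_zero_cons]
      · -- tail cells: shift rows by one
        apply List.map_congr_left
        intro t ht
        obtain ⟨ht1, ht2⟩ := PySem.List.mem_pyRange_one.mp ht
        rw [pyGetD_cons_shift _ _ _ (by omega) (by omega)]
        congr 2
        omega
    · rw [if_neg (fun h => absurd h.2.1 (by omega)),
          PySem.List.pyRange_one_eq_nil (by omega),
          PySem.List.pyRange_one_eq_nil (by omega)]
      simp

lemma foldRows_length (w : Nat) :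
    ∀ (rows : List (List String)) (s : Int) (bks : List (List String)),
    ((PySem.List.enumerate rows s).foldl (fun b p => rowStepB w b p.1 p.2) bks).length
      = bks.length := by
  intro rows
  induction rows with
  | nil => intro s bks; rw [PySem.List.enumerate_nil]; rfl
  | cons row rest ih =>
    intro s bks
    rw [PySem.List.enumerate_cons, List.foldl_cons, ih, length_rowStepB]

lemma B_eq_diagSpec (l : List (List String)) :
    first_row_main_diag_alt l = diagSpec l := by
  unfold first_row_main_diag_alt diagSpec
  simp only [PySem.List.slice_from_one]
  set w := (PySem.List.pyGetD l 0 []).length with hw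
  set buckets := (PySem.List.enumerate l 0).foldl
    (fun bks p => rowStepB w bks p.1 p.2) (List.replicate w []) with hbuckets
  have hblen : buckets.length = w := by
    rw [hbuckets, foldRows_length, List.length_replicate]
  apply List.ext_getElem
  · simp [hblen, PySem.List.length_pyRange_one]
  · intro k hk1 hk2
    rw [List.getElem_map, List.getElem_map, List.getElem_tail,
      PySem.List.getElem_pyRange_one]
    congr 1
    have hkw : k + 1 < w := by
      simp [hblen] at hk1; omega
    rw [← List.getD_eq_getElem buckets [] (by omega), hbuckets,
      foldRows_getD w l 0 _ (by omega) (by simp) (k + 1) (by omega) hkw]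
    rw [List.getD_replicate, List.nil_append]
    have hr : min ((0 : Int) + l.length) ((w : Int) - ((k + 1 : Nat) : Int))
        = min (l.length : Int) ((w : Int) - (1 + (k : Int))) := by push_cast; omega
    rw [hr]
    apply List.map_congr_left
    intro t ht
    rw [sub_zero, show ((k + 1 : Nat) : Int) + t = 1 + (k : Int) + t by push_cast; ring]
    exact hkw

-- ===== VERDICT (by name: the statement is the Claim_ definition above) =====
theorem first_row_main_diag_spec : Claim_equal_first_row_main_diag := by
  intro l _ hpre
  unfold Spec_first_row_main_diag
  rw [A_eq_diagSpec l hpre.1, B_eq_diagSpec l]
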